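-- pv_equiv track=rewrite | github.com/shaleenchordia/Automated-Candidate-Interview-Agent | skills_detector.py | _generate_skill_summary
-- ===== SOURCE A (Python) =====
-- from typing import Dict, List, Any
--
-- def _generate_skill_summary(results: Dict) -> str:
--     """Generate a human-readable summary of skills"""
--     if not results:
--         return "No significant technical skills detected."
--
--     top_skills = list(results.keys())[:5]
--     skill_count = len(results)
--
--     summary = f"Detected {skill_count} technical skill categories. "
--     summary += f"Strongest areas: {', '.join(top_skills[:3])}. "
--
--     # Count by domain
--     domains = {
--         'Programming Languages': [
--             'Python Programming', 'JavaScript Programming', 'Java Programming',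
--             'C/C++ Programming', 'C# Programming', 'Go Programming', 'Rust Programming',
--             'PHP Programming', 'Ruby Programming', 'Swift Programming', 'Kotlin Programming',
--             'Scala Programming', 'R Programming'
--         ],
--         'AI/ML & Data Science': [
--             'Machine Learning', 'Deep Learning', 'Data Science', 'Computer Vision',
--             'Natural Language Processing', 'Reinforcement Learning', 'Generative AI',
--             'Big Data Technologies', 'Data Engineering', 'Data Analytics & BI'
--         ],
--         'Cloud & Infrastructure': [
--             'Amazon Web Services', 'Microsoft Azure', 'Google Cloud Platform',
--             'Multi-Cloud & Hybrid', 'DevOps & CI/CD', 'Containerization & Orchestration',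
--             'Infrastructure as Code', 'Monitoring & Observability'
--         ],
--         'Database & Storage': [
--             'SQL Databases', 'NoSQL Databases', 'Search & Information Retrieval'
--         ],
--         'Web & Mobile Development': [
--             'Frontend Development', 'React Ecosystem', 'Vue.js Ecosystem', 'Angular Ecosystem',
--             'UI/UX Design', 'Mobile Development', 'Backend Development'
--         ],
--         'Architecture & Systems': [
--             'Microservices Architecture', 'System Architecture', 'Message Queues & Event Streaming'
--         ],
--         'Security & Testing': [
--             'Cybersecurity', 'Cloud Security', 'Application Security', 'Software Testing',
--             'Performance Testing', 'Test Management'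
--         ],
--         'Specialized Domains': [
--             'Game Development', 'Blockchain & Web3', 'IoT & Embedded Systems',
--             'Robotics & Automation', 'Fintech & Finance', 'Healthcare & Biotech'
--         ],
--         'Business & Management': [
--             'Project Management', 'Technical Leadership', 'Communication & Collaboration',
--             'Product Management', 'Business & Strategy', 'Sales & Marketing'
--         ]
--     }
--
--     domain_counts = {}
--     for domain, categories in domains.items():
--         count = sum(1 for cat in categories if cat in results)
--         if count > 0:
--             domain_counts[domain] = count
--
--     if domain_counts:
--         summary += f"Domain expertise in: {', '.join(domain_counts.keys())}."
--
--     return summary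
-- ===== SOURCE B (Python) =====
-- def _generate_skill_summary(results) -> str:
--     """Generate a human-readable summary of skills (inverted-index single pass)."""
--     if not results:
--         return "No significant technical skills detected."
--
--     domains = {
--         'Programming Languages': [
--             'Python Programming', 'JavaScript Programming', 'Java Programming',
--             'C/C++ Programming', 'C# Programming', 'Go Programming', 'Rust Programming',
--             'PHP Programming', 'Ruby Programming', 'Swift Programming', 'Kotlin Programming',
--             'Scala Programming', 'R Programming'
--         ],
--         'AI/ML & Data Science': [
--             'Machine Learning', 'Deep Learning', 'Data Science', 'Computer Vision',
--             'Natural Language Processing', 'Reinforcement Learning', 'Generative AI',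
--             'Big Data Technologies', 'Data Engineering', 'Data Analytics & BI'
--         ],
--         'Cloud & Infrastructure': [
--             'Amazon Web Services', 'Microsoft Azure', 'Google Cloud Platform',
--             'Multi-Cloud & Hybrid', 'DevOps & CI/CD', 'Containerization & Orchestration',
--             'Infrastructure as Code', 'Monitoring & Observability'
--         ],
--         'Database & Storage': [
--             'SQL Databases', 'NoSQL Databases', 'Search & Information Retrieval'
--         ],
--         'Web & Mobile Development': [
--             'Frontend Development', 'React Ecosystem', 'Vue.js Ecosystem', 'Angular Ecosystem',
--             'UI/UX Design', 'Mobile Development', 'Backend Development'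
--         ],
--         'Architecture & Systems': [
--             'Microservices Architecture', 'System Architecture', 'Message Queues & Event Streaming'
--         ],
--         'Security & Testing': [
--             'Cybersecurity', 'Cloud Security', 'Application Security', 'Software Testing',
--             'Performance Testing', 'Test Management'
--         ],
--         'Specialized Domains': [
--             'Game Development', 'Blockchain & Web3', 'IoT & Embedded Systems',
--             'Robotics & Automation', 'Fintech & Finance', 'Healthcare & Biotech'
--         ],
--         'Business & Management': [
--             'Project Management', 'Technical Leadership', 'Communication & Collaboration',
--             'Product Management', 'Business & Strategy', 'Sales & Marketing'
--         ]
--     }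
--
--     # inverted index: category -> domain (built once)
--     cat_to_domain = {}
--     for domain, categories in domains.items():
--         for cat in categories:
--             cat_to_domain[cat] = domain
--
--     keys = list(results.keys())
--
--     # single pass over the result keys, tallying per domain
--     hits = [cat_to_domain[s] for s in keys if s in cat_to_domain]
--     tally = {}
--     for d in hits:
--         tally[d] = tally.get(d, 0) + 1
--
--     hit_domains = [d for d in domains if tally.get(d, 0) > 0]
--
--     summary = (f"Detected {len(results)} technical skill categories. "
--                f"Strongest areas: {', '.join(keys[:3])}. ")
--     if hit_domains:
--         summary += f"Domain expertise in: {', '.join(hit_domains)}."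
--     return summary
-- ===== Notes on version B (the rewrite author's own statement) =====
-- stated objective: idiomatic
-- what changed: Instead of scanning every domain's category list against the results dict, B builds an inverted category-to-domain index once, tallies domains in a single pass over the result keys, and emits the domains (in declaration order) with a positive tally.
import Mathlib
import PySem

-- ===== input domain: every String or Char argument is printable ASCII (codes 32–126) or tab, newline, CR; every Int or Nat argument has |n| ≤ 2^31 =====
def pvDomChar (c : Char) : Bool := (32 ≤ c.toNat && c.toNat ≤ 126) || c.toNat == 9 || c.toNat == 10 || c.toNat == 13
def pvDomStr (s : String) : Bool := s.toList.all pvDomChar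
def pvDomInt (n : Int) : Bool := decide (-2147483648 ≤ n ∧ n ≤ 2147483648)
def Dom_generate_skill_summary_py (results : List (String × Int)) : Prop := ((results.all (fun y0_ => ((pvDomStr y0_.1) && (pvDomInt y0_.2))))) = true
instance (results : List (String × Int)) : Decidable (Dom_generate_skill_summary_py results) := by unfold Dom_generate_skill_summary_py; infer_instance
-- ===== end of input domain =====

-- B replaces A's per-domain category-count scans by an inverted category→domain index and one
-- tally pass over the result keys (idiomatic; same cost at this fixed table size).
-- The dict argument 'results' is the association list of the Python dict in insertion order;
-- list(results.keys()) is modelled by PySem.Set.ofList of the first components.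

-- ===== PORT A =====
-- the literal 'domains' table of the Python source (a data constant both sources contain verbatim)
def skillDomains : List (String × List String) :=
  [ ("Programming Languages",
      ["Python Programming", "JavaScript Programming", "Java Programming",
       "C/C++ Programming", "C# Programming", "Go Programming", "Rust Programming",
       "PHP Programming", "Ruby Programming", "Swift Programming", "Kotlin Programming",
       "Scala Programming", "R Programming"]),
    ("AI/ML & Data Science",
      ["Machine Learning", "Deep Learning", "Data Science", "Computer Vision",
       "Natural Language Processing", "Reinforcement Learning", "Generative AI",
       "Big Data Technologies", "Data Engineering", "Data Analytics & BI"]),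
    ("Cloud & Infrastructure",
      ["Amazon Web Services", "Microsoft Azure", "Google Cloud Platform",
       "Multi-Cloud & Hybrid", "DevOps & CI/CD", "Containerization & Orchestration",
       "Infrastructure as Code", "Monitoring & Observability"]),
    ("Database & Storage",
      ["SQL Databases", "NoSQL Databases", "Search & Information Retrieval"]),
    ("Web & Mobile Development",
      ["Frontend Development", "React Ecosystem", "Vue.js Ecosystem", "Angular Ecosystem",
       "UI/UX Design", "Mobile Development", "Backend Development"]),
    ("Architecture & Systems",
      ["Microservices Architecture", "System Architecture", "Message Queues & Event Streaming"]),
    ("Security & Testing",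
      ["Cybersecurity", "Cloud Security", "Application Security", "Software Testing",
       "Performance Testing", "Test Management"]),
    ("Specialized Domains",
      ["Game Development", "Blockchain & Web3", "IoT & Embedded Systems",
       "Robotics & Automation", "Fintech & Finance", "Healthcare & Biotech"]),
    ("Business & Management",
      ["Project Management", "Technical Leadership", "Communication & Collaboration",
       "Product Management", "Business & Strategy", "Sales & Marketing"]) ]

-- A's inner loop: count = sum(1 for cat in categories if cat in results)
def catCount (keys : List String) (cats : List String) : Int :=
  cats.foldl (fun c cat => if PySem.Set.contains keys cat then c + 1 else c) 0

-- A's 'for domain, categories in domains.items()' loop building domain_counts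
def domainCounts (keys : List String) : PySem.Dict String Int :=
  skillDomains.foldl (fun d p =>
    let count := catCount keys p.2
    if 0 < count then d.insert p.1 count else d) PySem.Dict.empty

def generate_skill_summary_py (results : List (String × Int)) : String :=
  if results = [] then "No significant technical skills detected."
  else
    -- keys of the dict: distinct first components in insertion order
    let keys : List String := PySem.Set.ofList (results.map (·.1))
    let top_skills := keys.take 5
    let skill_count : Int := (keys.length : Int)
    let summary := "Detected " ++ PySem.Int.toStr skill_count ++ " technical skill categories. "
    let summary := summary ++ "Strongest areas: " ++ PySem.Str.join ", " (top_skills.take 3) ++ ". "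
    let domain_counts := domainCounts keys
    if domain_counts.size ≠ 0 then
      summary ++ "Domain expertise in: " ++ PySem.Str.join ", " domain_counts.keys ++ "."
    else summary

-- ===== PORT B =====
-- cat_to_domain: the inverted index built once in Source B (a closed constant)
def catToDomain : PySem.Dict String String :=
  skillDomains.foldl (fun d p => p.2.foldl (fun d c => d.insert c p.1) d) PySem.Dict.empty

-- tally[d] = tally.get(d, 0) + 1 over the hit list
def tallyOf (hits : List String) : PySem.Dict String Int :=
  hits.foldl (fun t d => t.insert d (t.getD d 0 + 1)) PySem.Dict.empty

-- hit_domains = [d for d in domains if tally.get(d, 0) > 0]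
def hitDomains (keys : List String) : List String :=
  (skillDomains.map (·.1)).filter
    (fun d => 0 < (tallyOf (keys.filterMap (fun s => catToDomain.get? s))).getD d 0)

def generate_skill_summary_py_alt (results : List (String × Int)) : String :=
  if results = [] then "No significant technical skills detected."
  else
    let keys : List String := PySem.Set.ofList (results.map (·.1))
    -- hits = [cat_to_domain[s] for s in keys if s in cat_to_domain] feeds the tally; hit_domains from it
    let hit_domains := hitDomains keys
    let summary := "Detected " ++ PySem.Int.toStr (keys.length : Int) ++ " technical skill categories. "
       ++ "Strongest areas: " ++ PySem.Str.join ", " (keys.take 3) ++ ". "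
    if hit_domains ≠ [] then
      summary ++ "Domain expertise in: " ++ PySem.Str.join ", " hit_domains ++ "."
    else summary

-- ===== PRECONDITION & SPEC =====
def Spec_generate_skill_summary_py (results : List (String × Int)) (out : String) : Prop := out = generate_skill_summary_py_alt results
instance (results : List (String × Int)) (out : String) : Decidable (Spec_generate_skill_summary_py results out) := by unfold Spec_generate_skill_summary_py; infer_instance

-- ===== CLAIM (what is proved, stated in full; the proofs are below) =====
def Claim_equal_generate_skill_summary_py : Prop := ∀ (results : List (String × Int)), Dom_generate_skill_summary_py results → Spec_generate_skill_summary_py results (generate_skill_summary_py results)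

-- ===== LEMMAS AND PROOFS =====

-- keys of a conditional fresh-key insert loop (A's domain_counts loop) are the filtered names
lemma keys_cond_insert (l : List (String × List String)) (cnt : String × List String → Int)
    (d0 : PySem.Dict String Int)
    (hnd : (l.map (·.1)).Nodup) (hf : ∀ p ∈ l, d0.contains p.1 = false) :
    (l.foldl (fun d p => if 0 < cnt p then d.insert p.1 (cnt p) else d) d0).keys
      = d0.keys ++ (l.filter (fun p => decide (0 < cnt p))).map (·.1) := by
  induction l generalizing d0 with
  | nil => simp
  | cons p t ih =>
    simp only [List.map_cons, List.nodup_cons] at hnd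
    have hfp : d0.contains p.1 = false := hf p (by simp)
    by_cases hc : 0 < cnt p
    · have hk := PySem.Dict.keys_insert_of_not_contains (d := d0) (v := cnt p) hfp
      simp only [List.foldl_cons, if_pos hc, List.filter_cons, decide_eq_true hc]
      rw [ih (d0.insert p.1 (cnt p)) hnd.2 ?_]
      · simp [hk]
      · intro q hq
        have hne : q.1 ≠ p.1 := fun h => hnd.1 (h ▸ List.mem_map_of_mem hq)
        rw [PySem.Dict.contains_insert]
        simp [hne, hf q (List.mem_cons_of_mem _ hq)]
    · simp only [List.foldl_cons, if_neg hc, List.filter_cons, decide_eq_false hc]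
      exact ih d0 hnd.2 (fun q hq => hf q (List.mem_cons_of_mem _ hq))

-- the inverted index's items are exactly the (category, domain) pairs, in table order
set_option maxRecDepth 100000 in
lemma items_catToDomain :
    catToDomain.items = skillDomains.flatMap (fun q => q.2.map (fun c => (c, q.1))) := by
  decide

set_option maxRecDepth 100000 in
lemma nodup_keys_catToDomain : catToDomain.keys.Nodup := by decide

set_option maxRecDepth 100000 in
lemma nodup_fst_skillDomains : (skillDomains.map (·.1)).Nodup := by decide

-- looking a key up in the inverted index finds its (unique) domain
lemma get?_catToDomain (s d : String) :
    catToDomain.get? s = some d ↔ ∃ q ∈ skillDomains, s ∈ q.2 ∧ q.1 = d := by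
  rw [PySem.Dict.get?_eq_some_iff_mem_items catToDomain s d nodup_keys_catToDomain,
      items_catToDomain]
  simp only [List.mem_flatMap, List.mem_map, Prod.mk.injEq]
  constructor
  · rintro ⟨q, hq, c, hc, rfl, rfl⟩; exact ⟨q, hq, hc, rfl⟩
  · rintro ⟨q, hq, hs, rfl⟩; exact ⟨q, hq, s, hs, rfl, rfl⟩

-- per domain: A's positive category count ↔ B's positive tally
lemma count_iff_tally (keys : List String) (p : String × List String) (hp : p ∈ skillDomains) :
    (0 < p.2.countP (fun cat => PySem.Set.contains keys cat)) ↔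
      (0 < (keys.filterMap (fun s => catToDomain.get? s)).count p.1) := by
  rw [List.countP_pos_iff, List.count_pos_iff, List.mem_filterMap]
  constructor
  · rintro ⟨c, hc, hmem⟩
    refine ⟨c, ?_, (get?_catToDomain c p.1).mpr ⟨p, hp, hc, rfl⟩⟩
    simpa [PySem.Set.contains] using hmem
  · rintro ⟨s, hs, hget⟩
    obtain ⟨q, hq, hsq, hqd⟩ := (get?_catToDomain s p.1).mp hget
    have hqp : q = p := List.inj_on_of_nodup_map nodup_fst_skillDomains hq hp hqd
    exact ⟨s, hqp ▸ hsq, by simpa [PySem.Set.contains] using hs⟩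

-- A's domain_counts.keys equals B's hit_domains, for any key list
lemma domain_keys_eq (keys : List String) : (domainCounts keys).keys = hitDomains keys := by
  unfold domainCounts hitDomains tallyOf
  rw [keys_cond_insert skillDomains (fun p => catCount keys p.2) PySem.Dict.empty
        nodup_fst_skillDomains (by simp [PySem.Dict.contains_empty]),
      List.filter_map]
  simp only [PySem.Dict.keys_empty, List.nil_append]
  apply congrArg
  apply List.filter_congr
  intro p hp
  simp only [Function.comp]
  rw [PySem.Dict.foldl_insert_getD_add_one_eq_counter, PySem.Dict.getD_counter]
  have hcnt : catCount keys p.2 = (p.2.countP (fun cat => PySem.Set.contains keys cat) : Int) := by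
    unfold catCount
    rw [PySem.List.foldl_if_add_one, zero_add]
  rw [hcnt]
  simp only [Int.natCast_pos, decide_eq_decide]
  exact count_iff_tally keys p hp

lemma size_domainCounts (keys : List String) :
    (domainCounts keys).size = (hitDomains keys).length := by
  have h : (domainCounts keys).size = (domainCounts keys).keys.length := by
    simp [PySem.Dict.size, PySem.Dict.keys]
  rw [h, domain_keys_eq]

-- ===== VERDICT (by name: the statement is the Claim_ definition above) =====
theorem generate_skill_summary_py_spec : Claim_equal_generate_skill_summary_py := by
  intro results _
  unfold Spec_generate_skill_summary_py generate_skill_summary_py generate_skill_summary_py_alt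
  by_cases h : results = []
  · simp [h]
  · simp only [if_neg h, List.take_take]
    set keys : List String := PySem.Set.ofList (results.map (·.1)) with hkeys
    rw [domain_keys_eq, size_domainCounts]
    norm_num
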